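-- pv_equiv track=rewrite | github.com/jkling2/google-hash-code-2020 | test/test.py | getRegisteredBooksPerLib
-- ===== SOURCE A (Python) =====
-- def getRegisteredBooksPerLib(outputData, registeredLibsAtTime, shippingTimes, days):
--     registeredBooksPerLib = {}
--     for libData in outputData:
--         libId = libData[0]
--         bookList = libData[1]
--         date = registeredLibsAtTime.get(libId)
--         currentShippingTime = shippingTimes[libId]
--         registeredBooks = []
--         for book in bookList:
--             date += currentShippingTime
--             if date < days:
--                 registeredBooks.append(book)
--             else:
--                 break
--         registeredBooksPerLib.update({libId : registeredBooks})
--     return registeredBooksPerLib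
-- ===== SOURCE B (Python) =====
-- def getRegisteredBooksPerLib(outputData, registeredLibsAtTime, shippingTimes, days):
--     result = {}
--     for libId, bookList in outputData:
--         st = shippingTimes[libId]
--         if not bookList:
--             result[libId] = []
--             continue
--         date = registeredLibsAtTime.get(libId)
--         if st > 0:
--             k = (days - date - 1) // st
--             result[libId] = bookList[:k] if k > 0 else []
--         else:
--             result[libId] = list(bookList) if date + st < days else []
--     return result
-- ===== Notes on version B (the rewrite author's own statement) =====
-- stated objective: alternative
-- what changed: The inner append-until-break loop over each book list is replaced by a closed-form count: for positive shipping time take bookList[:(days-date-1)//st], for non-positive shipping time all books or none depending on date+st < days.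
import Mathlib
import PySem

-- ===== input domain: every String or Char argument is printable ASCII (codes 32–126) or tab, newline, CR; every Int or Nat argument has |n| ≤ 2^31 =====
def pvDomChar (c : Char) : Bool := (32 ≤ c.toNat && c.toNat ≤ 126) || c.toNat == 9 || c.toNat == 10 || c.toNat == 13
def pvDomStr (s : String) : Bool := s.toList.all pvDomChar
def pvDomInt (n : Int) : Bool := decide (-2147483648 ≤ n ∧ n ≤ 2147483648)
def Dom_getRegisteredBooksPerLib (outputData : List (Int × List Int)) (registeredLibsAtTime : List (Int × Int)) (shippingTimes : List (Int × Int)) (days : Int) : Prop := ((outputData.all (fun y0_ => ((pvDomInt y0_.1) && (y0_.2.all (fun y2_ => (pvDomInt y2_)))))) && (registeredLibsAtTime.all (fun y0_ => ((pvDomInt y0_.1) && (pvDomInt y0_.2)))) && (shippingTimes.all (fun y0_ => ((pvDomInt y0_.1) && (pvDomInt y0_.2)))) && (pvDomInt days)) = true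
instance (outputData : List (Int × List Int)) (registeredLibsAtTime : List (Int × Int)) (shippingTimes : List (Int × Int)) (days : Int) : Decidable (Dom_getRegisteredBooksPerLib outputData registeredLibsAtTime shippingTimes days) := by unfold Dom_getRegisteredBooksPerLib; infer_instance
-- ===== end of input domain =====

-- B replaces A's inner append-until-break loop with a closed-form slice count (alternative decomposition, same cost).

-- ===== PORT A =====
-- inner 'for book in bookList: date += st; if date < days: append else break' loop
def pvInnerA (bookList : List Int) (date st days : Int) : List Int :=
  match bookList with
  | [] => []
  | b :: rest => if date + st < days then b :: pvInnerA rest (date + st) st days else []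

def getRegisteredBooksPerLib (outputData : List (Int × List Int)) (registeredLibsAtTime : List (Int × Int)) (shippingTimes : List (Int × Int)) (days : Int) : List (Int × List Int) :=
  (outputData.foldl (fun acc libData =>
      let libId := libData.1
      let bookList := libData.2
      let date? := (PySem.Dict.ofList registeredLibsAtTime).get? libId
      -- shippingTimes[libId]: KeyError when missing (excluded by Pre_); getD 0 stands for the raising lookup
      let st := ((PySem.Dict.ofList shippingTimes).get? libId).getD 0
      let books := match date? with
        | some d => pvInnerA bookList d st days
        | none => ([] : List Int)   -- date = None: loop body never runs only when bookList = [] (Pre_)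
      acc.insert libId books) PySem.Dict.empty).items

-- ===== PORT B =====
def getRegisteredBooksPerLib_alt (outputData : List (Int × List Int)) (registeredLibsAtTime : List (Int × Int)) (shippingTimes : List (Int × Int)) (days : Int) : List (Int × List Int) :=
  (outputData.foldl (fun acc p =>
      let libId := p.1
      let bookList := p.2
      let st := ((PySem.Dict.ofList shippingTimes).get? libId).getD 0
      let books :=
        if bookList.isEmpty then ([] : List Int)
        else
          let d := ((PySem.Dict.ofList registeredLibsAtTime).get? libId).getD 0
          if 0 < st then
            let k := PySem.Int.floordiv (days - d - 1) st
            if 0 < k then PySem.List.slice bookList none (some k) else []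
          else if d + st < days then bookList else []
      acc.insert libId books) PySem.Dict.empty).items

-- ===== PRECONDITION & SPEC =====
-- Pre_ excludes exactly the inputs where A raises: a library whose id is missing from shippingTimes
-- (KeyError), or missing from registeredLibsAtTime with a non-empty book list (TypeError on None + int).
def Pre_getRegisteredBooksPerLib (outputData : List (Int × List Int)) (registeredLibsAtTime : List (Int × Int)) (shippingTimes : List (Int × Int)) (days : Int) : Prop :=
  ∀ p ∈ outputData,
    (PySem.Dict.ofList shippingTimes).get? p.1 ≠ none ∧
    (p.2 ≠ [] → (PySem.Dict.ofList registeredLibsAtTime).get? p.1 ≠ none)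
instance (outputData : List (Int × List Int)) (registeredLibsAtTime : List (Int × Int)) (shippingTimes : List (Int × Int)) (days : Int) : Decidable (Pre_getRegisteredBooksPerLib outputData registeredLibsAtTime shippingTimes days) := by unfold Pre_getRegisteredBooksPerLib; infer_instance

def pvWitness_getRegisteredBooksPerLib : (List (Int × List Int)) × (List (Int × Int)) × (List (Int × Int)) × Int := ([(0, [1, 2, 3]), (1, [])], [(0, 0)], [(0, 2), (1, 1)], 5)

def Spec_getRegisteredBooksPerLib (outputData : List (Int × List Int)) (registeredLibsAtTime : List (Int × Int)) (shippingTimes : List (Int × Int)) (days : Int) (out : List (Int × List Int)) : Prop := out = getRegisteredBooksPerLib_alt outputData registeredLibsAtTime shippingTimes days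
instance (outputData : List (Int × List Int)) (registeredLibsAtTime : List (Int × Int)) (shippingTimes : List (Int × Int)) (days : Int) (out : List (Int × List Int)) : Decidable (Spec_getRegisteredBooksPerLib outputData registeredLibsAtTime shippingTimes days out) := by unfold Spec_getRegisteredBooksPerLib; infer_instance

-- ===== CLAIM (what is proved, stated in full; the proofs are below) =====
def Claim_equal_getRegisteredBooksPerLib : Prop := ∀ (outputData : List (Int × List Int)) (registeredLibsAtTime : List (Int × Int)) (shippingTimes : List (Int × Int)) (days : Int), Dom_getRegisteredBooksPerLib outputData registeredLibsAtTime shippingTimes days → Pre_getRegisteredBooksPerLib outputData registeredLibsAtTime shippingTimes days → Spec_getRegisteredBooksPerLib outputData registeredLibsAtTime shippingTimes days (getRegisteredBooksPerLib outputData registeredLibsAtTime shippingTimes days)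

-- ===== LEMMAS AND PROOFS =====

-- positive shipping time: A's loop takes exactly max(0, (days-d-1)//st) books
theorem pvInnerA_pos (bl : List Int) (st days : Int) (hst : 0 < st) :
    ∀ d : Int, pvInnerA bl d st days =
      (if 0 < PySem.Int.floordiv (days - d - 1) st
       then bl.take (PySem.Int.floordiv (days - d - 1) st).toNat else []) := by
  induction bl with
  | nil => intro d; simp [pvInnerA]
  | cons b rest ih =>
    intro d
    by_cases hc : d + st < days
    · have h1 : (1 : Int) ≤ PySem.Int.floordiv (days - d - 1) st := by
        rw [PySem.Int.le_floordiv_iff_mul_le hst]; omega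
      have hrec : PySem.Int.floordiv (days - (d + st) - 1) st
          = PySem.Int.floordiv (days - d - 1) st - 1 := by
        set q := PySem.Int.floordiv (days - d - 1) st with hq
        have := (PySem.Int.floordiv_eq_iff_of_pos hst).mp hq.symm
        rw [PySem.Int.floordiv_eq_iff_of_pos hst]
        constructor
        · nlinarith [this.1]
        · nlinarith [this.2]
      have htn : (PySem.Int.floordiv (days - d - 1) st).toNat
          = (PySem.Int.floordiv (days - d - 1) st - 1).toNat + 1 := by omega
      simp only [pvInnerA, if_pos hc, ih (d + st), hrec]
      rw [if_pos (by omega : (0:Int) < PySem.Int.floordiv (days - d - 1) st), htn]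
      by_cases h2 : (0 : Int) < PySem.Int.floordiv (days - d - 1) st - 1
      · rw [if_pos h2]; simp [List.take_succ_cons]
      · rw [if_neg h2]
        have : (PySem.Int.floordiv (days - d - 1) st - 1).toNat = 0 := by omega
        simp [this]
    · have h0 : PySem.Int.floordiv (days - d - 1) st < 1 := by
        rw [PySem.Int.floordiv_lt_iff_lt_mul hst]; omega
      simp only [pvInnerA, if_neg hc]
      rw [if_neg (by omega)]

-- non-positive shipping time: the condition is monotone, so it is all books or none
theorem pvInnerA_nonpos (bl : List Int) (st days : Int) (hst : st ≤ 0) :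
    ∀ d : Int, pvInnerA bl d st days = (if d + st < days then bl else []) := by
  induction bl with
  | nil => intro d; simp [pvInnerA]
  | cons b rest ih =>
    intro d
    by_cases hc : d + st < days
    · simp only [pvInnerA, if_pos hc, ih (d + st)]
      rw [if_pos (by omega : d + st + st < days)]
    · simp [pvInnerA, if_neg hc]

-- per-library agreement of the two loop bodies' book lists
theorem pvBooks_eq (registeredLibsAtTime shippingTimes : List (Int × Int)) (days : Int)
    (lid : Int) (bl : List Int)
    (hr : bl ≠ [] → (PySem.Dict.ofList registeredLibsAtTime).get? lid ≠ none) :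
    (match (PySem.Dict.ofList registeredLibsAtTime).get? lid with
      | some d => pvInnerA bl d (((PySem.Dict.ofList shippingTimes).get? lid).getD 0) days
      | none => ([] : List Int)) =
    (if bl.isEmpty then ([] : List Int)
     else
       let d := ((PySem.Dict.ofList registeredLibsAtTime).get? lid).getD 0
       let st := ((PySem.Dict.ofList shippingTimes).get? lid).getD 0
       if 0 < st then
         let k := PySem.Int.floordiv (days - d - 1) st
         if 0 < k then PySem.List.slice bl none (some k) else []
       else if d + st < days then bl else []) := by
  rcases bl with _ | ⟨b, rest⟩
  · rcases (PySem.Dict.ofList registeredLibsAtTime).get? lid with _ | d <;> simp [pvInnerA]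
  · rcases hd : (PySem.Dict.ofList registeredLibsAtTime).get? lid with _ | d
    · exact absurd hd (hr (by simp))
    · simp only [Option.getD_some, List.isEmpty_cons, Bool.false_eq_true, if_false]
      set st := ((PySem.Dict.ofList shippingTimes).get? lid).getD 0 with hstdef
      by_cases hst : 0 < st
      · rw [pvInnerA_pos _ _ _ hst]
        simp only [if_pos hst]
        by_cases hk : 0 < PySem.Int.floordiv (days - d - 1) st
        · rw [if_pos hk, if_pos hk, PySem.List.slice_to _ (by omega)]
        · rw [if_neg hk, if_neg hk]
      · rw [pvInnerA_nonpos _ _ _ (by omega), if_neg hst]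
        split <;> rfl

-- the two fold loops keep identical accumulators
theorem pvFold_eq (registeredLibsAtTime shippingTimes : List (Int × Int)) (days : Int) :
    ∀ (l : List (Int × List Int)) (acc : PySem.Dict Int (List Int)),
      (∀ p ∈ l, (PySem.Dict.ofList shippingTimes).get? p.1 ≠ none ∧
        (p.2 ≠ [] → (PySem.Dict.ofList registeredLibsAtTime).get? p.1 ≠ none)) →
      l.foldl (fun acc libData =>
        let libId := libData.1
        let bookList := libData.2
        let date? := (PySem.Dict.ofList registeredLibsAtTime).get? libId
        let st := ((PySem.Dict.ofList shippingTimes).get? libId).getD 0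
        let books := match date? with
          | some d => pvInnerA bookList d st days
          | none => ([] : List Int)
        acc.insert libId books) acc
      = l.foldl (fun acc p =>
        let libId := p.1
        let bookList := p.2
        let st := ((PySem.Dict.ofList shippingTimes).get? libId).getD 0
        let books :=
          if bookList.isEmpty then ([] : List Int)
          else
            let d := ((PySem.Dict.ofList registeredLibsAtTime).get? libId).getD 0
            if 0 < st then
              let k := PySem.Int.floordiv (days - d - 1) st
              if 0 < k then PySem.List.slice bookList none (some k) else []
            else if d + st < days then bookList else []
        acc.insert libId books) acc := by
  intro l
  induction l with
  | nil => intro acc _; rfl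
  | cons p rest ih =>
    intro acc h
    simp only [List.foldl_cons]
    rw [pvBooks_eq registeredLibsAtTime shippingTimes days p.1 p.2 (h p (by simp)).2]
    exact ih _ (fun q hq => h q (by simp [hq]))

-- ===== VERDICT (by name: the statement is the Claim_ definition above) =====
theorem getRegisteredBooksPerLib_spec : Claim_equal_getRegisteredBooksPerLib := by
  intro outputData registeredLibsAtTime shippingTimes days _ hpre
  unfold Spec_getRegisteredBooksPerLib getRegisteredBooksPerLib getRegisteredBooksPerLib_alt
  rw [pvFold_eq registeredLibsAtTime shippingTimes days outputData PySem.Dict.empty hpre]
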